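-- pv_equiv track=rewrite | github.com/kzsofia92/benchmark470handler | app.py | _vc_ip
-- ===== SOURCE A (Python) =====
-- def _vc_ip(new_value: str) -> bool:
--     """
--     Allow only digits and dots.
--     Max 4 blocks, each 0–3 digits.
--     """
--     s = new_value
--     if s == "":
--         return True
--
--     # Only digits and dots
--     for ch in s:
--         if not (ch.isdigit() or ch == "."):
--             return False
--
--     parts = s.split(".")
--     if len(parts) > 4:
--         return False
--
--     for part in parts:
--         if len(part) > 3:
--             return False
--         if part and not part.isdigit():
--             return False
--
--     return True
-- ===== SOURCE B (Python) =====
-- def _vc_ip(new_value: str) -> bool: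
--     # Single linear scan: no split(), no second pass over parts.
--     dot_count = 0
--     block_len = 0
--     for ch in new_value:
--         if ch == ".":
--             dot_count += 1
--             if dot_count == 4:
--                 return False
--             block_len = 0
--         elif ch.isdigit():
--             block_len += 1
--             if block_len == 4:
--                 return False
--         else:
--             return False
--     return True
-- ===== Notes on version B (the rewrite author's own statement) =====
-- stated objective: simpler
-- what changed: Replaced the three passes (character filter, dot-split into a parts list, per-part loop) by one single linear scan maintaining a dot counter and the current block length, with no intermediate parts list.
import Mathlib
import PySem

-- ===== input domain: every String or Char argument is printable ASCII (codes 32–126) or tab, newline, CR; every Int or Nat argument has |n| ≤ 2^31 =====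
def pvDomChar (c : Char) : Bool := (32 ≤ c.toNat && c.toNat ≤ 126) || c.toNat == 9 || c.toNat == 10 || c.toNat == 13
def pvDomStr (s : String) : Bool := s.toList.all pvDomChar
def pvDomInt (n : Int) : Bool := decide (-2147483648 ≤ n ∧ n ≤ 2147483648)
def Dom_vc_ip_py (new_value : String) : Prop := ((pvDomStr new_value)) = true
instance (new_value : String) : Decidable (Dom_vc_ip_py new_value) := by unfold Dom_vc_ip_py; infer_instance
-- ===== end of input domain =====

-- B replaces A's three passes (char filter, dot-split, per-part loop) by one single linear scan
-- with a dot counter and the current block length; same return value, no parts list allocated.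

-- ===== PORT A =====
-- A's first loop: return False on the first char that is neither a digit nor '.'
def vcAChars : List Char → Bool
  | [] => true
  | c :: rest => if !(PySem.Chars.isdigit c || c == '.') then false else vcAChars rest

-- A's second loop over parts: len(part) > 3 → False; part nonempty and not isdigit → False
def vcAParts : List (List Char) → Bool
  | [] => true
  | p :: ps =>
    if p.length > 3 then false
    else if !p.isEmpty && !(PySem.Chars.strIsdigit p) then false
    else vcAParts ps

-- 'if len(parts) > 4: return False' followed by the part loop
def vcACheck (parts : List (List Char)) : Bool :=
  if parts.length > 4 then false else vcAParts parts

def vc_ip_py (new_value : String) : Bool :=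
  if new_value == "" then true
  else if vcAChars new_value.toList then
    vcACheck (PySem.Chars.splitOn new_value.toList ['.'])
  else false

-- ===== PORT B =====
-- B's single scan: dot_count and block_len exactly as in Source B
def vcBScan : List Char → Nat → Nat → Bool
  | [], _, _ => true
  | c :: rest, dotCount, blockLen =>
    if c == '.' then
      if dotCount + 1 == 4 then false else vcBScan rest (dotCount + 1) 0
    else if PySem.Chars.isdigit c then
      if blockLen + 1 == 4 then false else vcBScan rest dotCount (blockLen + 1)
    else false

def vc_ip_py_alt (new_value : String) : Bool := vcBScan new_value.toList 0 0

-- ===== PRECONDITION & SPEC =====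
def Spec_vc_ip_py (new_value : String) (out : Bool) : Prop := out = vc_ip_py_alt new_value
instance (new_value : String) (out : Bool) : Decidable (Spec_vc_ip_py new_value out) := by unfold Spec_vc_ip_py; infer_instance

-- ===== CLAIM (what is proved, stated in full; the proofs are below) =====
def Claim_equal_vc_ip_py : Prop := ∀ (new_value : String), Dom_vc_ip_py new_value → Spec_vc_ip_py new_value (vc_ip_py new_value)

-- ===== LEMMAS AND PROOFS =====

-- reference split on '.' with an accumulated (reversed) current block
def splitD : List Char → List Char → List (List Char)
  | [], cur => [cur.reverse]
  | c :: rest, cur => if c = '.' then cur.reverse :: splitD rest [] else splitD rest (c :: cur)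

def partOK (p : List Char) : Bool := decide (p.length ≤ 3) && p.all PySem.Chars.isdigit

theorem splitD_ne_nil (cs cur : List Char) : splitD cs cur ≠ [] := by
  induction cs generalizing cur with
  | nil => simp [splitD]
  | cons c rest ih =>
    simp only [splitD]
    split_ifs <;> simp [ih]

theorem splitD_head (cs cur : List Char) :
    ∃ t ps, splitD cs cur = (cur.reverse ++ t) :: ps := by
  induction cs generalizing cur with
  | nil => exact ⟨[], [], by simp [splitD]⟩
  | cons c rest ih =>
    by_cases h : c = '.'
    · exact ⟨[], splitD rest [], by simp [splitD, h]⟩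
    · obtain ⟨t, ps, hts⟩ := ih (c :: cur)
      exact ⟨c :: t, ps, by simp [splitD, h, hts]⟩

theorem splitD_mem (c : Char) (hne : c ≠ '.') :
    ∀ (cs cur : List Char), c ∈ cs → ∃ p ∈ splitD cs cur, c ∈ p := by
  intro cs
  induction cs with
  | nil => intro cur hc; cases hc
  | cons d rest ih =>
    intro cur hc
    by_cases hd : d = '.'
    · have hcr : c ∈ rest := by
        rcases List.mem_cons.mp hc with h | h
        · exact absurd (h.trans hd) hne
        · exact h
      obtain ⟨p, hp, hcp⟩ := ih [] hcr
      refine ⟨p, ?_, hcp⟩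
      rw [show splitD (d :: rest) cur = cur.reverse :: splitD rest [] from by simp [splitD, hd]]
      exact List.mem_cons_of_mem _ hp
    · rcases List.mem_cons.mp hc with rfl | h
      · obtain ⟨t, ps, hts⟩ := splitD_head rest (c :: cur)
        refine ⟨(c :: cur).reverse ++ t, ?_, by simp⟩
        rw [show splitD (c :: rest) cur = splitD rest (c :: cur) from by simp [splitD, hd], hts]
        exact List.mem_cons_self
      · obtain ⟨p, hp, hcp⟩ := ih (d :: cur) h
        refine ⟨p, ?_, hcp⟩
        rw [show splitD (d :: rest) cur = splitD rest (d :: cur) from by simp [splitD, hd]]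
        exact hp

-- the fueled splitOn.go with sep = ['.'] computes splitD
theorem go_eq_splitD (fuel : Nat) (l cur : List Char) (acc : List (List Char))
    (h : l.length ≤ fuel) :
    PySem.Chars.splitOn.go ['.'] fuel l cur acc = acc.reverse ++ splitD l cur := by
  induction fuel generalizing l cur acc with
  | zero =>
    have : l = [] := List.length_eq_zero_iff.mp (Nat.le_zero.mp h)
    subst this
    simp [PySem.Chars.splitOn.go, splitD]
  | succ fuel ih =>
    cases l with
    | nil => simp [PySem.Chars.splitOn.go, splitD]
    | cons c rest =>
      by_cases hc : c = '.'
      · subst hc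
        rw [show PySem.Chars.splitOn.go ['.'] (fuel + 1) ('.' :: rest) cur acc
              = PySem.Chars.splitOn.go ['.'] fuel rest [] (cur.reverse :: acc) by
            simp [PySem.Chars.splitOn.go, List.isPrefixOf]]
        rw [ih rest [] (cur.reverse :: acc) (by simpa using Nat.le_of_succ_le_succ h)]
        simp [splitD]
      · rw [show PySem.Chars.splitOn.go ['.'] (fuel + 1) (c :: rest) cur acc
              = PySem.Chars.splitOn.go ['.'] fuel rest (c :: cur) acc by
            simp [PySem.Chars.splitOn.go, List.isPrefixOf, Ne.symm hc]]
        rw [ih rest (c :: cur) acc (by simpa using Nat.le_of_succ_le_succ h)]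
        simp [splitD, hc]

theorem splitOn_eq_splitD (cs : List Char) :
    PySem.Chars.splitOn cs ['.'] = splitD cs [] := by
  have := go_eq_splitD (cs.length + 1) cs [] [] (Nat.le_succ _)
  simpa [PySem.Chars.splitOn] using this

-- A's part loop is the all-parts check
theorem vcAParts_eq_all (ps : List (List Char)) : vcAParts ps = ps.all partOK := by
  induction ps with
  | nil => rfl
  | cons p ps ih =>
    rw [List.all_cons, ← ih]
    by_cases hlen : p.length > 3
    · have hpf : partOK p = false := by
        have hd : decide (p.length ≤ 3) = false := by rw [decide_eq_false_iff_not]; omega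
        simp [partOK, hd]
      simp [vcAParts, hlen, hpf]
    · have hdec : decide (p.length ≤ 3) = true := decide_eq_true (by omega)
      cases p with
      | nil => simp [vcAParts, partOK, PySem.Chars.strIsdigit]
      | cons c cs =>
        by_cases hall : (c :: cs).all PySem.Chars.isdigit = true
        · simp [vcAParts, partOK, PySem.Chars.strIsdigit, hall]
          rw [show decide (cs.length < 3) = !decide (3 ≤ cs.length) by
            rw [← decide_not, decide_eq_decide]; omega]
        · have hallf : (c :: cs).all PySem.Chars.isdigit = false := by simpa using hall
          simp [vcAParts, partOK, PySem.Chars.strIsdigit, hallf]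

-- B's scan computes the part-count bound and the all-parts check
theorem vcBScan_eq (cs : List Char) (dotCount : Nat) (cur : List Char)
    (hd : dotCount ≤ 3) (hcur : cur.all PySem.Chars.isdigit = true) (hlen : cur.length ≤ 3) :
    vcBScan cs dotCount cur.length =
      (decide (dotCount + (splitD cs cur).length ≤ 4) && (splitD cs cur).all partOK) := by
  induction cs generalizing dotCount cur with
  | nil =>
    have hrev : cur.reverse.all PySem.Chars.isdigit = true := by simpa using hcur
    have hok : partOK cur.reverse = true := by simp [partOK, hrev]; exact hlen
    have h1 : dotCount + 1 ≤ 4 := by omega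
    simp [vcBScan, splitD, hok, h1]
  | cons c rest ih =>
    by_cases hc : c = '.'
    · subst hc
      rw [show splitD ('.' :: rest) cur = cur.reverse :: splitD rest [] from by simp [splitD]]
      by_cases h4 : dotCount + 1 = 4
      · have hL : 1 ≤ (splitD rest []).length :=
          List.length_pos_of_ne_nil (splitD_ne_nil rest [])
        have hbt : (dotCount + 1 == 4) = true := by simpa using h4
        simp [vcBScan, hbt]
        intro h
        exact absurd h (by omega)
      · have hbf : (dotCount + 1 == 4) = false := by simpa using h4
        have ihh := ih (dotCount + 1) [] (by omega) (by simp) (by simp)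
        simp only [List.length_nil] at ihh
        have hrev : cur.reverse.all PySem.Chars.isdigit = true := by simpa using hcur
        have hok : partOK cur.reverse = true := by simp [partOK, hrev]; exact hlen
        have step : vcBScan ('.' :: rest) dotCount cur.length
            = vcBScan rest (dotCount + 1) 0 := by simp [vcBScan, hbf]
        rw [step, ihh, List.all_cons, hok, Bool.true_and, List.length_cons,
          decide_eq_decide.mpr (by omega :
            dotCount + 1 + (splitD rest []).length ≤ 4 ↔
              dotCount + ((splitD rest []).length + 1) ≤ 4)]
    · have hcb : (c == '.') = false := by simpa using hc
      by_cases hdig : PySem.Chars.isdigit c = true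
      · by_cases h4 : cur.length + 1 = 4
        · obtain ⟨t, ps, hts⟩ := splitD_head rest (c :: cur)
          have hsp : splitD (c :: rest) cur = (cur.reverse ++ c :: t) :: ps := by
            rw [show splitD (c :: rest) cur = splitD rest (c :: cur) from by simp [splitD, hc]]
            simpa using hts
          have hb4 : (cur.length + 1 == 4) = true := by simpa using h4
          have hLHS : vcBScan (c :: rest) dotCount cur.length = false := by
            simp [vcBScan, hcb, hdig, hb4]
          have hpf : partOK (cur.reverse ++ c :: t) = false := by
            unfold partOK
            rw [decide_eq_false
              (by simp; omega : ¬ ((cur.reverse ++ c :: t).length ≤ 3)), Bool.false_and]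
          rw [hsp, hLHS, List.all_cons, hpf, Bool.false_and, Bool.and_false]
        · have hne : (cur.length + 1 == 4) = false := by simpa using h4
          have step : vcBScan (c :: rest) dotCount cur.length
              = vcBScan rest dotCount (cur.length + 1) := by simp [vcBScan, hcb, hdig, hne]
          have ihh := ih dotCount (c :: cur) hd (by simp [hdig, hcur]) (by simp; omega)
          simp only [List.length_cons] at ihh
          rw [step, ihh,
            show splitD (c :: rest) cur = splitD rest (c :: cur) from by simp [splitD, hc]]
      · have hdigf : PySem.Chars.isdigit c = false := by simpa using hdig
        obtain ⟨p, hp, hcp⟩ := splitD_mem c hc (c :: rest) cur (by simp)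
        have hpall : p.all PySem.Chars.isdigit = false :=
          List.all_eq_false.mpr ⟨c, hcp, by simp [hdigf]⟩
        have hpf : partOK p = false := by simp [partOK, hpall]
        have hall : (splitD (c :: rest) cur).all partOK = false :=
          List.all_eq_false.mpr ⟨p, hp, by simp [hpf]⟩
        simp [vcBScan, hcb, hdigf, hall]

theorem vcAChars_exists : ∀ cs : List Char, vcAChars cs = false →
    ∃ c ∈ cs, (PySem.Chars.isdigit c || c == '.') = false := by
  intro cs
  induction cs with
  | nil => intro h; simp [vcAChars] at h
  | cons c rest ih =>
    intro h
    by_cases hc : (PySem.Chars.isdigit c || c == '.') = true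
    · have hr : vcAChars rest = false := by simpa [vcAChars, hc] using h
      obtain ⟨d, hdm, hdp⟩ := ih hr
      exact ⟨d, List.mem_cons_of_mem _ hdm, hdp⟩
    · exact ⟨c, List.mem_cons_self, by simpa using hc⟩

-- a char of cs that fails A's first check makes some part fail partOK
theorem vcAChars_false (cs : List Char) (h : vcAChars cs = false) :
    (splitD cs []).all partOK = false := by
  obtain ⟨c, hcm, hcp⟩ := vcAChars_exists cs h
  rw [Bool.or_eq_false_iff] at hcp
  have hne : c ≠ '.' := by simpa using hcp.2
  obtain ⟨p, hp, hcpm⟩ := splitD_mem c hne cs [] hcm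
  have hpall : p.all PySem.Chars.isdigit = false :=
    List.all_eq_false.mpr ⟨c, hcpm, by simp [hcp.1]⟩
  exact List.all_eq_false.mpr ⟨p, hp, by simp [partOK, hpall]⟩

-- ===== VERDICT (by name: the statement is the Claim_ definition above) =====
theorem vc_ip_py_spec : Claim_equal_vc_ip_py := by
  intro s _
  show vc_ip_py s = vc_ip_py_alt s
  have hB : vc_ip_py_alt s =
      (decide (0 + (splitD s.toList []).length ≤ 4) && (splitD s.toList []).all partOK) := by
    have := vcBScan_eq s.toList 0 [] (by omega) (by simp) (by simp)
    simpa [vc_ip_py_alt] using this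
  unfold vc_ip_py
  by_cases hs : s = ""
  · subst hs
    simp [vc_ip_py_alt, vcBScan]
  · have hsb : (s == "") = false := by simpa using hs
    rw [if_neg (by simp [hsb])]
    rcases Bool.eq_false_or_eq_true (vcAChars s.toList) with hch | hch
    · rw [if_pos hch, splitOn_eq_splitD, hB]
      unfold vcACheck
      rw [vcAParts_eq_all]
      by_cases h4 : (splitD s.toList []).length > 4
      · have hdf : decide (0 + (splitD s.toList []).length ≤ 4) = false := by
          rw [decide_eq_false_iff_not]; omega
        rw [if_pos h4, hdf, Bool.false_and]
      · have hdt : decide (0 + (splitD s.toList []).length ≤ 4) = true :=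
          decide_eq_true (by omega)
        rw [if_neg h4, hdt, Bool.true_and]
    · rw [if_neg (by simp [hch]), hB, vcAChars_false s.toList hch]
      simp
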